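-- pv_equiv track=rewrite | github.com/kKunov/task_for_w0 | D1/prime_number_of_divisors.py | prime_number_of_divisors
-- ===== SOURCE A (Python) =====
-- def prime_number_of_divisors(n):
--     i = 1
--     k = 0
--     j = 0
--     while i <= n:
--         if n % i == 0:
--             k += 1
--         i += 1
--     i = 1
--     while i <= k:
--         if k % i == 0:
--             j += 1
--         i += 1
--     if j != 2:
--         return False
--     return True
-- ===== SOURCE B (Python) =====
-- def prime_number_of_divisors(n):
--     # Count divisors of n by pairing d with n // d, scanning only up to sqrt(n).
--     k = 0
--     i = 1
--     while i * i <= n: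
--         if n % i == 0:
--             k += 1 if i * i == n else 2
--         i += 1
--     # Primality of k by trial division up to sqrt(k), with early exit.
--     if k < 2:
--         return False
--     d = 2
--     while d * d <= k:
--         if k % d == 0:
--             return False
--         d += 1
--     return True
-- ===== Notes on version B (the rewrite author's own statement) =====
-- stated objective: faster
-- what changed: B counts divisors by pairing d with n//d up to sqrt(n) and tests primality of the count by trial division up to its square root with early exit, instead of A's two full linear scans 1..n and 1..k counting matches.
import Mathlib
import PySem

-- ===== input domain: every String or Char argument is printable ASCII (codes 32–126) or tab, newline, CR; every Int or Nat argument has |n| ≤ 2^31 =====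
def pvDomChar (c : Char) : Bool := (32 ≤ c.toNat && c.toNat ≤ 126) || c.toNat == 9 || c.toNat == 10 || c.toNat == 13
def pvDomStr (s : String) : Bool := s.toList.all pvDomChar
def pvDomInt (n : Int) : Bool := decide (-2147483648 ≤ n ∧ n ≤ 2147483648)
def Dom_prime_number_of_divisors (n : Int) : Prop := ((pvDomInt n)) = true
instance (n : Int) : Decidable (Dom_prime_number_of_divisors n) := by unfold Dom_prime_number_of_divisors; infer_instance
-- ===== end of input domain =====

-- B counts divisors by pairing d with n // d up to the square root of n and tests primality of
-- the count by trial division with early exit, instead of A's two full linear scans; objective: faster.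

-- ===== PORT A =====
-- A's two while-loops have the same shape (count i in [1..m] with m % i == 0); each is this fold.
def pvCountDivisors (m : Int) : Int :=
  (List.range' 1 m.toNat).foldl
    (fun (k : Int) (i : Nat) => if PySem.Int.mod m (i : Int) = 0 then k + 1 else k) 0

def prime_number_of_divisors (n : Int) : Bool :=
  let k := pvCountDivisors n
  let j := pvCountDivisors k
  if j ≠ 2 then false else true

-- ===== PORT B =====
-- first while-loop of B: i counts up while i*i <= n, adding 1 or 2 per small divisor found
def pvAltCountGo (n : Int) (i : Nat) (k : Int) : Int :=
  if h : ((i : Int) * i ≤ n) then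
    pvAltCountGo n (i + 1)
      (if PySem.Int.mod n (i : Int) = 0 then (if ((i : Int) * i = n) then k + 1 else k + 2) else k)
  else k
termination_by n.toNat + 1 - i
decreasing_by
  have h2 : (i : Int) ≤ (i : Int) * i := by
    rcases Nat.eq_zero_or_pos i with rfl | hp
    · simp
    · have h1 : (1 : Int) ≤ (i : Int) := by exact_mod_cast hp
      calc (i : Int) = i * 1 := (mul_one _).symm
        _ ≤ (i : Int) * i := mul_le_mul_of_nonneg_left h1 (Int.natCast_nonneg i)
  have h3 : i ≤ n.toNat := by simpa using Int.toNat_le_toNat (le_trans h2 h)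
  exact Nat.sub_succ_lt_self _ _ (Nat.lt_succ_of_le h3)

-- second while-loop of B: trial division of k by d = 2, 3, …, with early exit on a divisor
def pvAltTrial (k : Int) (d : Nat) : Bool :=
  if h : ((d : Int) * d ≤ k) then
    if PySem.Int.mod k (d : Int) = 0 then false else pvAltTrial k (d + 1)
  else true
termination_by k.toNat + 1 - d
decreasing_by
  have h2 : (d : Int) ≤ (d : Int) * d := by
    rcases Nat.eq_zero_or_pos d with rfl | hp
    · simp
    · have h1 : (1 : Int) ≤ (d : Int) := by exact_mod_cast hp
      calc (d : Int) = d * 1 := (mul_one _).symm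
        _ ≤ (d : Int) * d := mul_le_mul_of_nonneg_left h1 (Int.natCast_nonneg d)
  have h3 : d ≤ k.toNat := by simpa using Int.toNat_le_toNat (le_trans h2 h)
  exact Nat.sub_succ_lt_self _ _ (Nat.lt_succ_of_le h3)

def prime_number_of_divisors_alt (n : Int) : Bool :=
  let k := pvAltCountGo n 1 0
  if k < 2 then false else pvAltTrial k 2

-- ===== PRECONDITION & SPEC =====
def Spec_prime_number_of_divisors (n : Int) (out : Bool) : Prop := out = prime_number_of_divisors_alt n
instance (n : Int) (out : Bool) : Decidable (Spec_prime_number_of_divisors n out) := by unfold Spec_prime_number_of_divisors; infer_instance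

-- ===== CLAIM (what is proved, stated in full; the proofs are below) =====
def Claim_equal_prime_number_of_divisors : Prop := ∀ (n : Int), Dom_prime_number_of_divisors n → Spec_prime_number_of_divisors n (prime_number_of_divisors n)

-- ===== LEMMAS AND PROOFS =====

-- A fold that adds 1 on each hit counts the hits.
theorem pv_foldl_count (p : Nat → Prop) [DecidablePred p] (l : List Nat) (a : Int) :
    l.foldl (fun k i => if p i then k + 1 else k) a = a + (l.countP (fun i => decide (p i)) : Int) := by
  induction l generalizing a with
  | nil => simp
  | cons x xs ih => by_cases hx : p x <;> simp [hx, ih] <;> push_cast <;> ring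

theorem pv_divisors_card_eq_countP (N : Nat) :
    (N.divisors.card : Int) = ((List.range' 1 N).countP (fun i => decide (i ∣ N)) : Int) := by
  congr 1
  rw [Nat.divisors, Nat.Ico_eq_range']
  simp [Finset.card, Finset.filter, List.countP_eq_length_filter]

-- A's loop computes the number of divisors of m (for m ≥ 1).
theorem pvCountDivisors_eq (m : Int) (hm : 1 ≤ m) :
    pvCountDivisors m = (m.toNat.divisors.card : Int) := by
  unfold pvCountDivisors
  rw [pv_foldl_count (p := fun i => PySem.Int.mod m (i : Int) = 0)]
  rw [pv_divisors_card_eq_countP]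
  rw [Int.zero_add]
  congr 1
  apply List.countP_congr
  intro i hi
  have hmn : m = (m.toNat : Int) := by omega
  have hiff : ((i : Int) ∣ m) ↔ i ∣ m.toNat := by
    constructor
    · intro h; exact Int.ofNat_dvd.mp (by rwa [hmn] at h)
    · intro h; rw [hmn]; exact_mod_cast h
  simp [PySem.Int.mod_eq_zero_iff_dvd, hiff]

-- the weight B adds at a small candidate d
def pvW (N d : Nat) : Nat := if d ∣ N then (if d * d = N then 1 else 2) else 0

-- B's counting loop sums the weights of the remaining candidates up to sqrt(n).
theorem pvAltCountGo_spec (n : Int) (hn : 1 ≤ n) (i : Nat) (k : Int) (hi : 1 ≤ i) :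
    pvAltCountGo n i k =
      k + ((∑ d ∈ Finset.Ico i (Nat.sqrt n.toNat + 1), pvW n.toNat d : Nat) : Int) := by
  induction i, k using pvAltCountGo.induct n with
  | case1 i k h ih =>
    have hc : ((i * i : Nat) : Int) ≤ n := by push_cast; exact h
    have hle : i * i ≤ n.toNat := by omega
    have his : i ≤ Nat.sqrt n.toNat := Nat.le_sqrt.mpr hle
    rw [pvAltCountGo, dif_pos h]
    rw [Finset.sum_eq_sum_Ico_succ_bot (by omega)]
    simp only [dite_eq_ite] at ih
    rw [ih (by omega)]
    have hdvd : (PySem.Int.mod n (i : Int) = 0) ↔ i ∣ n.toNat := by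
      rw [PySem.Int.mod_eq_zero_iff_dvd]
      constructor
      · intro h2; exact Int.ofNat_dvd.mp (by rwa [show n = (n.toNat : Int) by omega] at h2)
      · intro h2; rw [show n = (n.toNat : Int) by omega]; exact_mod_cast h2
    have hsq : ((i : Int) * i = n) ↔ i * i = n.toNat := by
      constructor
      · intro h2
        have : ((i * i : Nat) : Int) = n := by push_cast; exact h2
        omega
      · intro h2; push_cast [← h2]; omega
    unfold pvW
    by_cases h1 : i ∣ n.toNat <;> by_cases h2 : i * i = n.toNat <;>
      simp [h1, h2, hdvd, hsq] <;> push_cast <;> ring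
  | case2 i k h =>
    have hc : ¬ ((i * i : Nat) : Int) ≤ n := by push_cast; exact h
    have hgt : n.toNat < i * i := by omega
    have : Nat.sqrt n.toNat < i := Nat.sqrt_lt.mpr hgt
    rw [pvAltCountGo, dif_neg h, Finset.Ico_eq_empty (by simp; omega)]
    simp

-- the square-root pairing d ↦ N / d matches the large divisors with the small ones
theorem pv_card_L_eq_P (N : Nat) (hN : 1 ≤ N) :
    (N.divisors.filter (fun d => N < d * d)).card
      = (N.divisors.filter (fun d => d * d < N)).card := by
  apply Finset.card_nbij' (fun d => N / d) (fun e => N / e)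
  · intro d hd
    simp only [Finset.coe_filter, Set.mem_setOf_eq, Nat.mem_divisors] at hd ⊢
    obtain ⟨⟨hdvd, hN0⟩, hlt⟩ := hd
    have hd1 : 1 ≤ d := Nat.pos_of_dvd_of_pos hdvd (by omega)
    have he : N / d * d = N := Nat.div_mul_cancel hdvd
    refine ⟨⟨Nat.div_dvd_of_dvd hdvd, hN0⟩, ?_⟩
    by_contra hge
    push_neg at hge
    nlinarith [he, hlt, hge]
  · intro e he'
    simp only [Finset.coe_filter, Set.mem_setOf_eq, Nat.mem_divisors] at he' ⊢
    obtain ⟨⟨hdvd, hN0⟩, hlt⟩ := he'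
    have he1 : 1 ≤ e := Nat.pos_of_dvd_of_pos hdvd (by omega)
    have he : N / e * e = N := Nat.div_mul_cancel hdvd
    refine ⟨⟨Nat.div_dvd_of_dvd hdvd, hN0⟩, ?_⟩
    by_contra hge
    push_neg at hge
    nlinarith [he, hlt, hge]
  · intro d hd
    simp only [Finset.coe_filter, Set.mem_setOf_eq, Nat.mem_divisors] at hd
    exact Nat.div_div_self hd.1.1 hd.1.2
  · intro e he'
    simp only [Finset.coe_filter, Set.mem_setOf_eq, Nat.mem_divisors] at he'
    exact Nat.div_div_self he'.1.1 he'.1.2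

-- the small-divisor weights sum to the full divisor count
theorem pv_sum_w (N : Nat) (hN : 1 ≤ N) :
    (∑ d ∈ Finset.Ico 1 (Nat.sqrt N + 1), pvW N d) = N.divisors.card := by
  have hTeq : (Finset.Ico 1 (Nat.sqrt N + 1)).filter (fun d => d ∣ N)
      = N.divisors.filter (fun d => d * d ≤ N) := by
    ext d
    simp only [Finset.mem_filter, Finset.mem_Ico, Nat.mem_divisors]
    constructor
    · rintro ⟨⟨h1, h2⟩, h3⟩
      exact ⟨⟨h3, by omega⟩, Nat.le_sqrt.mp (by omega)⟩
    · rintro ⟨⟨h1, h2⟩, h3⟩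
      have hd1 : 1 ≤ d := Nat.pos_of_dvd_of_pos h1 (by omega)
      have := Nat.le_sqrt.mpr h3
      exact ⟨⟨hd1, by omega⟩, h1⟩
  have step1 : (∑ d ∈ Finset.Ico 1 (Nat.sqrt N + 1), pvW N d)
      = ∑ d ∈ N.divisors.filter (fun d => d * d ≤ N), (if d * d = N then 1 else 2) := by
    rw [← hTeq]
    rw [Finset.sum_filter]
    apply Finset.sum_congr rfl
    intro d _
    unfold pvW
    split_ifs <;> rfl
  rw [step1, Finset.sum_ite]
  have hE : (N.divisors.filter (fun d => d * d ≤ N)).filter (fun d => d * d = N)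
      = N.divisors.filter (fun d => d * d = N) := by
    rw [Finset.filter_filter]; apply Finset.filter_congr; intro d _; constructor
    · rintro ⟨_, h⟩; exact h
    · intro h; omega
  have hP : (N.divisors.filter (fun d => d * d ≤ N)).filter (fun d => ¬ d * d = N)
      = N.divisors.filter (fun d => d * d < N) := by
    rw [Finset.filter_filter]; apply Finset.filter_congr; intro d _; constructor
    · rintro ⟨h1, h2⟩; omega
    · intro h; omega
  rw [hE, hP]
  simp only [Finset.sum_const, smul_eq_mul, mul_one]
  have hsplit1 : (N.divisors.filter (fun d => d * d ≤ N)).card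
      + (N.divisors.filter (fun d => ¬ d * d ≤ N)).card = N.divisors.card :=
    Finset.card_filter_add_card_filter_not _
  have hsplit2 : ((N.divisors.filter (fun d => d * d ≤ N)).filter (fun d => d * d = N)).card
      + ((N.divisors.filter (fun d => d * d ≤ N)).filter (fun d => ¬ d * d = N)).card
      = (N.divisors.filter (fun d => d * d ≤ N)).card :=
    Finset.card_filter_add_card_filter_not _
  rw [hE, hP] at hsplit2
  have hLP := pv_card_L_eq_P N hN
  have hnotle : (N.divisors.filter (fun d => ¬ d * d ≤ N)).card
      = (N.divisors.filter (fun d => N < d * d)).card := by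
    congr 1
    apply Finset.filter_congr
    intro d _
    constructor
    · intro h; omega
    · intro h; omega
  omega

-- a number is prime exactly when it has exactly two divisors (A's criterion)
theorem pv_card_divisors_eq_two_iff (K : Nat) : K.divisors.card = 2 ↔ K.Prime := by
  constructor
  · intro h
    have hK0 : K ≠ 0 := by
      rintro rfl; simp [Nat.divisors_zero] at h
    have hK1 : K ≠ 1 := by
      rintro rfl; simp [Nat.divisors_one] at h
    by_contra hp
    obtain ⟨m, hm, hm2, hmK⟩ := Nat.exists_dvd_of_not_prime2 (by omega) hp
    have hsub : ({1, m, K} : Finset ℕ) ⊆ K.divisors := by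
      intro x hx
      simp only [Finset.mem_insert, Finset.mem_singleton] at hx
      rcases hx with rfl | rfl | rfl
      · exact Nat.one_mem_divisors.mpr hK0
      · exact Nat.mem_divisors.mpr ⟨hm, hK0⟩
      · exact Nat.mem_divisors.mpr ⟨dvd_rfl, hK0⟩
    have hcard : ({1, m, K} : Finset ℕ).card = 3 := by
      rw [Finset.card_insert_of_notMem (by simp; omega),
          Finset.card_insert_of_notMem (by simp; omega), Finset.card_singleton]
    have := Finset.card_le_card hsub
    omega
  · intro hp
    rw [hp.divisors]
    rw [Finset.card_insert_of_notMem (by simp [hp.one_lt.ne]), Finset.card_singleton]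

-- B's trial-division loop succeeds iff no candidate from d up divides K
theorem pvAltTrial_spec (K : Nat) (d : Nat) (hd : 2 ≤ d) :
    pvAltTrial (K : Int) d = true ↔ ∀ m, d ≤ m → m * m ≤ K → ¬ m ∣ K := by
  induction d using pvAltTrial.induct (K : Int) with
  | case1 d h hdvd =>
    rw [pvAltTrial, dif_pos h, if_pos hdvd]
    have hdd : d * d ≤ K := by push_cast at h; omega
    have hdvd' : d ∣ K := by
      rw [PySem.Int.mod_eq_zero_iff_dvd] at hdvd
      exact_mod_cast hdvd
    simp only [Bool.false_eq_true, false_iff]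
    push_neg
    exact ⟨d, le_rfl, hdd, hdvd'⟩
  | case2 d h hdvd ih =>
    rw [pvAltTrial, dif_pos h, if_neg hdvd]
    have hdd : d * d ≤ K := by push_cast at h; omega
    have hdvd' : ¬ d ∣ K := by
      rw [PySem.Int.mod_eq_zero_iff_dvd] at hdvd
      intro hc; exact hdvd (by exact_mod_cast hc)
    rw [ih (by omega)]
    constructor
    · intro hall m hm hmm hdm
      rcases Nat.eq_or_lt_of_le hm with rfl | hlt
      · exact hdvd' hdm
      · exact hall m hlt hmm hdm
    · intro hall m hm hmm hdm
      exact hall m (by omega) hmm hdm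
  | case3 d h =>
    rw [pvAltTrial, dif_neg h]
    have hdd : K < d * d := by
      have : ¬ ((d * d : Nat) : Int) ≤ (K : Int) := by push_cast; exact h
      omega
    simp only [true_iff]
    intro m hm hmm hdm
    have : d * d ≤ m * m := Nat.mul_le_mul hm hm
    omega

-- ===== VERDICT (by name: the statement is the Claim_ definition above) =====
theorem prime_number_of_divisors_spec : Claim_equal_prime_number_of_divisors := by
  intro n _
  simp only [Spec_prime_number_of_divisors, prime_number_of_divisors, prime_number_of_divisors_alt]
  by_cases hn : 1 ≤ n
  · have hN : 1 ≤ n.toNat := by omega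
    have hA1 : pvCountDivisors n = (n.toNat.divisors.card : Int) := pvCountDivisors_eq n hn
    have hB1 : pvAltCountGo n 1 0 = (n.toNat.divisors.card : Int) := by
      rw [pvAltCountGo_spec n hn 1 0 le_rfl, pv_sum_w n.toNat hN, Int.zero_add]
    set K := n.toNat.divisors.card with hKdef
    have hK1 : 1 ≤ K := Finset.card_pos.mpr ⟨1, Nat.one_mem_divisors.mpr (by omega)⟩
    have hA2 : pvCountDivisors (K : Int) = (K.divisors.card : Int) := by
      rw [pvCountDivisors_eq (K : Int) (by exact_mod_cast hK1)]
      simp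
    rw [hA1, hB1, hA2]
    by_cases hK2 : 2 ≤ K
    · have hRlt : ¬ ((K : Int) < 2) := by exact_mod_cast Nat.not_lt.mpr hK2
      rw [if_neg hRlt]
      by_cases hp : K.Prime
      · have ht : pvAltTrial (K : Int) 2 = true :=
          (pvAltTrial_spec K 2 le_rfl).mpr
            (fun m hm hmm => (Nat.prime_def_le_sqrt.mp hp).2 m hm (Nat.le_sqrt.mpr hmm))
        have hc : K.divisors.card = 2 := (pv_card_divisors_eq_two_iff K).mpr hp
        rw [ht, hc]
        norm_num
      · have hf : pvAltTrial (K : Int) 2 = false := by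
          cases hb : pvAltTrial (K : Int) 2
          · rfl
          · exfalso
            apply hp
            rw [Nat.prime_def_le_sqrt]
            exact ⟨hK2, fun m hm hms =>
              (pvAltTrial_spec K 2 le_rfl).mp hb m hm (Nat.le_sqrt.mp hms)⟩
        have hc : K.divisors.card ≠ 2 := fun h => hp ((pv_card_divisors_eq_two_iff K).mp h)
        have hcast : ((K.divisors.card : Int) ≠ 2) := by exact_mod_cast hc
        rw [hf, if_pos hcast]
    · have hKeq : K = 1 := by omega
      rw [hKeq]
      norm_num [Nat.divisors_one]
  · have hA0 : pvCountDivisors n = 0 := by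
      unfold pvCountDivisors
      rw [show n.toNat = 0 by omega]
      simp
    have hA0' : pvCountDivisors 0 = 0 := by
      unfold pvCountDivisors
      simp
    have hB0 : pvAltCountGo n 1 0 = 0 := by
      rw [pvAltCountGo, dif_neg (by push_cast; omega)]
    rw [hA0, hA0', hB0]
    simp
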